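-- pv_equiv track=rewrite | github.com/queelius/computational-explorations | src/cycle_spectrum.py | find_odd_cycle_lengths
-- ===== SOURCE A (Python) =====
-- import math
-- from typing import Set, List, Tuple, Optional
--
-- def find_odd_cycle_lengths(A: Set[int], max_length: Optional[int] = None) -> Set[int]:
--     """
--     Find all odd cycle lengths present in the coprime graph G(A).
--
--     Uses adjacency matrix powers for small sets.
--     """
--     A_list = sorted(A)
--     n = len(A_list)
--     if n < 3:
--         return set()
--
--     if max_length is None:
--         max_length = n
--
--     idx = {a: i for i, a in enumerate(A_list)}
--
--     # Build adjacency matrix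
--     adj_matrix = [[False] * n for _ in range(n)]
--     for i in range(n):
--         for j in range(i + 1, n):
--             if math.gcd(A_list[i], A_list[j]) == 1:
--                 adj_matrix[i][j] = True
--                 adj_matrix[j][i] = True
--
--     cycle_lengths = set()
--
--     # For each potential cycle length, check existence
--     # Method: enumerate short cycles via DFS
--     for length in range(3, min(max_length + 1, n + 1)):
--         if length % 2 == 0:
--             continue  # Only odd cycles
--         if _has_cycle_of_length(adj_matrix, n, length):
--             cycle_lengths.add(length)
--
--     return cycle_lengths
--
-- def _has_cycle_of_length(adj: list, n: int, length: int) -> bool: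
--     """Check if graph has a cycle of given length using backtracking."""
--     if n < length:
--         return False
--
--     for start in range(n):
--         visited = [False] * n
--         visited[start] = True
--         if _dfs_cycle(adj, n, start, start, visited, 1, length):
--             return True
--     return False
--
-- def _dfs_cycle(adj: list, n: int, start: int, current: int,
--                visited: list, depth: int, target: int) -> bool:
--     """DFS to find cycle of exact target length returning to start."""
--     if depth == target:
--         return adj[current][start]
--
--     for next_v in range(n):
--         if adj[current][next_v] and not visited[next_v]:
--             visited[next_v] = True
--             if _dfs_cycle(adj, n, start, next_v, visited, depth + 1, target):
--                 return True
--             visited[next_v] = False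
--
--     return False
-- ===== SOURCE B (Python) =====
-- import math
--
-- def find_odd_cycle_lengths(A, max_length=None):
--     """Find all odd simple-cycle lengths in the coprime graph G(A).
--
--     One depth-capped DFS per start vertex records *every* cycle length it
--     closes (instead of re-running a separate target-length search for each
--     candidate length), keeps the visited set as a bitmask, and only keeps
--     descending while some candidate odd length longer than the current path
--     is still missing.
--     """
--     A_list = sorted(A)
--     n = len(A_list)
--     if n < 3:
--         return set()
--
--     limit = n if max_length is None else min(max_length, n)
--     cap = limit if limit % 2 == 1 else limit - 1  # only odd lengths matter
--
--     adj = [[i != j and math.gcd(A_list[i], A_list[j]) == 1 for j in range(n)]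
--            for i in range(n)]
--
--     found = set()
--     targets = range(3, cap + 1, 2)
--
--     def collect(start, current, visited, depth):
--         if depth >= 3 and adj[current][start]:
--             found.add(depth)
--         if depth < cap and any(L > depth and L not in found for L in targets):
--             for v in range(n):
--                 if adj[current][v] and not (visited >> v) & 1:
--                     collect(start, v, visited | (1 << v), depth + 1)
--
--     for s in range(n):
--         if any(L not in found for L in targets):
--             collect(s, s, 1 << s, 1)
--
--     return {L for L in targets if L in found}
-- ===== Notes on version B (the rewrite author's own statement) =====
-- stated objective: alternative
-- what changed: B replaces A's separate backtracking search per candidate odd length (each rerun from every start vertex) by a single depth-capped DFS per start vertex that records every cycle length it closes in one pass, keeps the visited set as a bitmask, builds the adjacency matrix by comprehension, and stops descending once no candidate odd length longer than the current path is missing.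
import Mathlib
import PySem

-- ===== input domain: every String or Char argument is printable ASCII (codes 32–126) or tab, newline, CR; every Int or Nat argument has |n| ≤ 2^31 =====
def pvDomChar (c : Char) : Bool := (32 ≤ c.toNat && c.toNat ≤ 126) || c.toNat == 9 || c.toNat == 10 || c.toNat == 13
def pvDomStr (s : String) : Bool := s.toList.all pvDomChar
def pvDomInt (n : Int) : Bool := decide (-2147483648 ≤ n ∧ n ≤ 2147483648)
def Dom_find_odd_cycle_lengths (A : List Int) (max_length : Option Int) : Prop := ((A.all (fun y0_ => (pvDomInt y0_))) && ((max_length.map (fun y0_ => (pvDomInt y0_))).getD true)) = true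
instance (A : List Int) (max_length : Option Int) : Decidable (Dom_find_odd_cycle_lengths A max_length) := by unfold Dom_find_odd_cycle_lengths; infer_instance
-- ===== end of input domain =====

-- B replaces A's per-target-length backtracking searches by ONE depth-bounded DFS per
-- start vertex that records every cycle length it closes (visited kept as a bitmask);
-- objective: alternative (one search pass instead of one per candidate length).

-- ===== PORT A =====
-- adj[i][j]: every index the Python reads here is produced by range(n), hence in range; getD is exact there
def pvAdjGet (adj : List (List Bool)) (i j : Nat) : Bool := (adj.getD i []).getD j false

-- 'adj_matrix[i][j] = True'
def pvSetT (m : List (List Bool)) (i j : Nat) : List (List Bool) := m.modify i (fun r => r.set j true)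

-- the nested for-loops of A building the adjacency matrix (math.gcd = Int.gcd, exact on all ints)
def pvBuildAdjA (xs : List Int) (n : Nat) : List (List Bool) :=
  (List.range n).foldl (fun m i =>
      (List.range' (i+1) (n - (i+1))).foldl (fun m j =>
          if Int.gcd (xs.getD i 0) (xs.getD j 0) == 1 then pvSetT (pvSetT m i j) j i else m) m)
    (List.replicate n (List.replicate n false))

-- _dfs_cycle; the 'target ≤ depth → false' branch is a totality guard: in that state the
-- Python recursion can never reach depth == target again and also returns False
def pvDfsA (adj : List (List Bool)) (n start current : Nat) (visited : List Bool)
    (depth target : Nat) : Bool :=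
  if depth == target then pvAdjGet adj current start
  else if target ≤ depth then false
  else (List.range n).any (fun v =>
    if pvAdjGet adj current v && !(visited.getD v false) then
      pvDfsA adj n start v (visited.set v true) (depth + 1) target
    else false)
termination_by target - depth
decreasing_by omega

-- _has_cycle_of_length
def pvHasCycle (adj : List (List Bool)) (n : Nat) (length : Nat) : Bool :=
  if n < length then false
  else (List.range n).any (fun s =>
    pvDfsA adj n s s ((List.replicate n false).set s true) 1 length)

-- find_odd_cycle_lengths; the dict 'idx' of A is dead code (never read) and is omitted;
-- 'length' in the loop is ≥ 3, so .toNat is exact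
def find_odd_cycle_lengths (A : List Int) (max_length : Option Int) : List Int :=
  let A_list := PySem.List.sorted A (fun x => x) false
  let n := A_list.length
  if n < 3 then [] else
  let maxL : Int := match max_length with | none => (n : Int) | some m => m
  let adj := pvBuildAdjA A_list n
  (PySem.List.pyRange 3 (min (maxL + 1) ((n : Int) + 1)) 1).foldl
    (fun acc len =>
      if PySem.Int.mod len 2 == 0 then acc
      else if pvHasCycle adj n len.toNat then PySem.Set.add acc len else acc) []

-- ===== PORT B =====
-- B's adjacency comprehension
def pvAdjB (xs : List Int) (n : Nat) : List (List Bool) :=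
  (List.range n).map (fun i => (List.range n).map (fun j =>
    decide (i ≠ j) && (Int.gcd (xs.getD i 0) (xs.getD j 0) == 1)))

-- B's 'collect': one DFS recording every cycle length it closes; visited is a bitmask;
-- it only recurses while some candidate odd length longer than the current path is missing
def pvCollect (adj : List (List Bool)) (n : Nat) (cap : Int) (start current : Nat)
    (visited : Nat) (depth : Nat) (found : List Int) : List Int :=
  let f1 := if 3 ≤ depth && pvAdjGet adj current start then PySem.Set.add found (depth : Int) else found
  if (depth : Int) < cap && (PySem.List.pyRange 3 (cap + 1) 2).any
      (fun L => decide ((depth : Int) < L) && !(PySem.Set.contains f1 L)) then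
    (List.range n).foldl (fun f v =>
      if pvAdjGet adj current v && !(visited.testBit v) then
        pvCollect adj n cap start v (visited ||| (1 <<< v)) (depth + 1) f
      else f) f1
  else f1
termination_by (cap - (depth : Int)).toNat
decreasing_by simp_all; omega

def find_odd_cycle_lengths_alt (A : List Int) (max_length : Option Int) : List Int :=
  let xs := PySem.List.sorted A (fun x => x) false
  let n := xs.length
  if n < 3 then [] else
  let limit : Int := match max_length with | none => (n : Int) | some m => min m (n : Int)
  let cap : Int := if PySem.Int.mod limit 2 == 1 then limit else limit - 1
  let adj := pvAdjB xs n
  let found := (List.range n).foldl (fun f s =>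
    if (PySem.List.pyRange 3 (cap + 1) 2).any (fun L => !(PySem.Set.contains f L)) then
      pvCollect adj n cap s s (1 <<< s) 1 f
    else f) []
  (PySem.List.pyRange 3 (cap + 1) 2).foldl
    (fun acc L => if found.contains L then PySem.Set.add acc L else acc) []

-- ===== PRECONDITION & SPEC =====
def Spec_find_odd_cycle_lengths (A : List Int) (max_length : Option Int) (out : List Int) : Prop := out = find_odd_cycle_lengths_alt A max_length
instance (A : List Int) (max_length : Option Int) (out : List Int) : Decidable (Spec_find_odd_cycle_lengths A max_length out) := by unfold Spec_find_odd_cycle_lengths; infer_instance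

-- ===== CLAIM (what is proved, stated in full; the proofs are below) =====
def Claim_equal_find_odd_cycle_lengths : Prop := ∀ (A : List Int) (max_length : Option Int), Dom_find_odd_cycle_lengths A max_length → Spec_find_odd_cycle_lengths A max_length (find_odd_cycle_lengths A max_length)

-- ===== LEMMAS AND PROOFS =====

-- ---- generic lemmas about membership in foldl-accumulated lists ----

theorem pv_foldl_mem_of_mem {α β : Type} (x : α) :
    ∀ (l : List β) (step : List α → β → List α),
      (∀ f v, v ∈ l → ∀ y : α, y ∈ f → y ∈ step f v) →
      ∀ f, x ∈ f → x ∈ l.foldl step f := by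
  intro l
  induction l with
  | nil => intro step _ f hx; simpa using hx
  | cons b bs ih =>
    intro step h f hx
    simp only [List.foldl_cons]
    exact ih step (fun f v hv => h f v (List.mem_cons_of_mem _ hv)) _
      (h f b (List.mem_cons_self) x hx)

theorem pv_foldl_mem_imp {α β : Type} (x : α) (P : Prop) :
    ∀ (l : List β) (step : List α → β → List α),
      (∀ f v, v ∈ l → x ∈ step f v → x ∈ f ∨ P) →
      ∀ f, x ∈ l.foldl step f → x ∈ f ∨ P := by
  intro l
  induction l with
  | nil => intro step _ f hx; exact Or.inl (by simpa using hx)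
  | cons b bs ih =>
    intro step h f hx
    simp only [List.foldl_cons] at hx
    rcases ih step (fun f v hv => h f v (List.mem_cons_of_mem _ hv)) _ hx with h1 | hP
    · exact h f b (List.mem_cons_self) h1
    · exact Or.inr hP

theorem pv_foldl_mem_iff {α β : Type} (x : α) (P : β → Prop) :
    ∀ (l : List β) (step : List α → β → List α),
      (∀ f v, v ∈ l → (x ∈ step f v ↔ x ∈ f ∨ P v)) →
      ∀ f, x ∈ l.foldl step f ↔ x ∈ f ∨ ∃ v ∈ l, P v := by
  intro l
  induction l with
  | nil => intro step _ f; simp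
  | cons b bs ih =>
    intro step h f
    simp only [List.foldl_cons]
    rw [ih step (fun f v hv => h f v (List.mem_cons_of_mem _ hv)),
        h f b (List.mem_cons_self)]
    constructor
    · rintro ((h1 | hP) | ⟨v, hv, hP⟩)
      · exact Or.inl h1
      · exact Or.inr ⟨b, List.mem_cons_self, hP⟩
      · exact Or.inr ⟨v, List.mem_cons_of_mem _ hv, hP⟩
    · rintro (h1 | ⟨v, hv, hP⟩)
      · exact Or.inl (Or.inl h1)
      · rcases List.mem_cons.mp hv with rfl | hv
        · exact Or.inl (Or.inr hP)
        · exact Or.inr ⟨v, hv, hP⟩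

-- ---- pvCollect: superset, lower bound, and its relation to pvDfsA ----

theorem pv_collect_sup (adj : List (List Bool)) (n : Nat) :
    ∀ (fuel : Nat) (cap : Int) (s c vis d : Nat) (f : List Int) (x : Int),
      (cap - (d : Int)).toNat ≤ fuel → x ∈ f → x ∈ pvCollect adj n cap s c vis d f := by
  intro fuel
  induction fuel with
  | zero =>
    intro cap s c vis d f x hfu hx
    rw [pvCollect]
    have hx1 : x ∈ (if 3 ≤ d && pvAdjGet adj c s then PySem.Set.add f (d : Int) else f) := by
      split
      · exact (PySem.Set.mem_add f _ x).mpr (Or.inl hx)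
      · exact hx
    set f1 := (if 3 ≤ d && pvAdjGet adj c s then PySem.Set.add f (d : Int) else f) with hf1e
    split
    · next hc =>
      exfalso
      simp only [Bool.and_eq_true, decide_eq_true_eq] at hc
      omega
    · exact hx1
  | succ fuel ih =>
    intro cap s c vis d f x hfu hx
    rw [pvCollect]
    have hx1 : x ∈ (if 3 ≤ d && pvAdjGet adj c s then PySem.Set.add f (d : Int) else f) := by
      split
      · exact (PySem.Set.mem_add f _ x).mpr (Or.inl hx)
      · exact hx
    set f1 := (if 3 ≤ d && pvAdjGet adj c s then PySem.Set.add f (d : Int) else f) with hf1e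
    split
    · next hc =>
      have hdc : (d : Int) < cap := by
        have hc' := hc
        simp only [Bool.and_eq_true, decide_eq_true_eq] at hc'
        exact hc'.1
      refine pv_foldl_mem_of_mem x _ _ ?_ _ hx1
      intro f v _ y hy
      split
      · exact ih cap s v _ (d+1) f y (by omega) hy
      · exact hy
    · exact hx1

theorem pv_collect_lb (adj : List (List Bool)) (n : Nat) :
    ∀ (fuel : Nat) (cap : Int) (s c vis d : Nat) (f : List Int) (x : Int),
      (cap - (d : Int)).toNat ≤ fuel → x ∈ pvCollect adj n cap s c vis d f →
      x ∈ f ∨ (d : Int) ≤ x := by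
  intro fuel
  induction fuel with
  | zero =>
    intro cap s c vis d f x hfu hx
    rw [pvCollect] at hx
    set f1 := (if 3 ≤ d && pvAdjGet adj c s then PySem.Set.add f (d : Int) else f) with hf1e
    have hstep : x ∈ f1 → x ∈ f ∨ (d : Int) ≤ x := by
      rw [hf1e]; split
      · intro hx
        rcases (PySem.Set.mem_add f _ x).mp hx with h | rfl
        · exact Or.inl h
        · exact Or.inr le_rfl
      · exact Or.inl
    revert hx; split
    · next hc =>
      exfalso
      simp only [Bool.and_eq_true, decide_eq_true_eq] at hc
      omega
    · exact hstep
  | succ fuel ih =>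
    intro cap s c vis d f x hfu hx
    rw [pvCollect] at hx
    set f1 := (if 3 ≤ d && pvAdjGet adj c s then PySem.Set.add f (d : Int) else f) with hf1e
    have hstep : x ∈ f1 → x ∈ f ∨ (d : Int) ≤ x := by
      rw [hf1e]; split
      · intro hx
        rcases (PySem.Set.mem_add f _ x).mp hx with h | rfl
        · exact Or.inl h
        · exact Or.inr le_rfl
      · exact Or.inl
    revert hx; split
    · next hc =>
      have hdc : (d : Int) < cap := by
        have hc' := hc
        simp only [Bool.and_eq_true, decide_eq_true_eq] at hc'
        exact hc'.1
      intro hx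
      have hprop : ∀ (f : List Int) (v : Nat), v ∈ List.range n →
          x ∈ (if pvAdjGet adj c v && !vis.testBit v then
                pvCollect adj n cap s v (vis ||| 1 <<< v) (d+1) f else f) →
          x ∈ f ∨ ((d : Int) + 1 ≤ x) := by
        intro f v _ hy
        revert hy; split
        · intro hy
          rcases ih cap s v _ (d+1) f x (by omega) hy with h | h
          · exact Or.inl h
          · exact Or.inr (by push_cast at h ⊢; omega)
        · exact Or.inl
      rcases pv_foldl_mem_imp x ((d : Int) + 1 ≤ x) _ _ hprop _ hx with h1 | hP
      · exact hstep h1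
      · exact Or.inr (by omega)
    · exact hstep

theorem pv_collect_dfs_eq (adj : List (List Bool)) (n : Nat) (cap : Int) (t : Nat)
    (h3 : 3 ≤ t) (s c vis : Nat) (f : List Int) :
    ((t : Int) ∈ pvCollect adj n cap s c vis t f ↔
      (t : Int) ∈ f ∨ pvAdjGet adj c s = true) := by
  rw [pvCollect]
  simp only [(by simp [h3] : (decide (3 ≤ t) && pvAdjGet adj c s) = pvAdjGet adj c s)]
  have key : ∀ f1 : List Int,
      ((t : Int) ∈ (if decide ((t : Int) < cap) && (PySem.List.pyRange 3 (cap + 1) 2).any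
            (fun L => decide ((t : Int) < L) && !(PySem.Set.contains f1 L)) then
          (List.range n).foldl (fun f v =>
            if pvAdjGet adj c v && !vis.testBit v then
              pvCollect adj n cap s v (vis ||| 1 <<< v) (t+1) f
            else f) f1
        else f1)) ↔ (t : Int) ∈ f1 := by
    intro f1
    split
    · have hprop : ∀ (f : List Int) (v : Nat), v ∈ List.range n →
          (t : Int) ∈ (if pvAdjGet adj c v && !vis.testBit v then
              pvCollect adj n cap s v (vis ||| 1 <<< v) (t+1) f else f) →
          (t : Int) ∈ f ∨ False := by
        intro f v _ hy
        revert hy; split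
        · intro hy
          rcases pv_collect_lb adj n _ cap s v _ (t+1) f _ le_rfl hy with h | h
          · exact Or.inl h
          · exact absurd h (by push_cast; omega)
        · exact Or.inl
      constructor
      · intro hx
        rcases pv_foldl_mem_imp ((t : Int)) False _ _ hprop _ hx with h | h
        · exact h
        · exact absurd h (by simp)
      · intro hx
        refine pv_foldl_mem_of_mem _ _ _ ?_ _ hx
        intro f v _ y hy
        split
        · exact pv_collect_sup adj n _ cap s v _ (t+1) f y le_rfl hy
        · exact hy
    · exact Iff.rfl
  cases hadj : pvAdjGet adj c s with
  | true =>
    simp only [key]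
    simp [PySem.Set.mem_add]
  | false =>
    simp only [key]
    simp

theorem pv_rel_set (n : Nat) (vl : List Bool) (vis v : Nat)
    (hlen : vl.length = n) (hv : v < n)
    (hrel : ∀ w, w < n → vl.getD w false = vis.testBit w) :
    ∀ w, w < n → (vl.set v true).getD w false = (vis ||| 1 <<< v).testBit w := by
  intro w hw
  rw [Nat.testBit_or, Nat.one_shiftLeft, Nat.testBit_two_pow,
      List.getD_eq_getElem?_getD, List.getElem?_set]
  by_cases hvw : v = w
  · subst hvw
    simp [hlen ▸ hw]
  · simp only [if_neg hvw, decide_eq_true_eq]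
    rw [← List.getD_eq_getElem?_getD, hrel w hw]
    simp [hvw]

theorem pv_rel_init (n s : Nat) (hs : s < n) :
    ∀ w, w < n → ((List.replicate n false).set s true).getD w false = (1 <<< s : Nat).testBit w := by
  intro w hw
  have h0 : ((0 : Nat) ||| 1 <<< s) = 1 <<< s := by simp
  rw [← h0]
  refine pv_rel_set n (List.replicate n false) 0 s (by simp) hs ?_ w hw
  intro u hu
  simp [List.getD_eq_getElem?_getD, List.getElem?_replicate, hu]

theorem pv_collect_dfs (adj : List (List Bool)) (n : Nat) (cap : Int) (t : Nat)
    (h3 : 3 ≤ t) (hodd : t % 2 = 1) (hcap : (t : Int) ≤ cap) :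
    ∀ (fuel : Nat) (s c : Nat) (vl : List Bool) (vis : Nat) (d : Nat) (f : List Int),
      t - d ≤ fuel → s < n → c < n → d ≤ t → vl.length = n →
      (∀ v, v < n → vl.getD v false = vis.testBit v) →
      ((t : Int) ∈ pvCollect adj n cap s c vis d f ↔
        (t : Int) ∈ f ∨ pvDfsA adj n s c vl d t = true) := by
  intro fuel
  induction fuel with
  | zero =>
    intro s c vl vis d f hfu hs hc hdt hlen hrel
    have hd : d = t := by omega
    subst hd
    rw [pv_collect_dfs_eq adj n cap d h3 s c vis f, pvDfsA]
    simp
  | succ fuel ih =>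
    intro s c vl vis d f hfu hs hc hdt hlen hrel
    by_cases hd : d = t
    · subst hd
      rw [pv_collect_dfs_eq adj n cap d h3 s c vis f, pvDfsA]
      simp
    · have hdlt : d < t := by omega
      have hnle : ¬ (t ≤ d) := by omega
      have hcapd : (d : Int) < cap := by omega
      rw [pvCollect, pvDfsA, if_neg (by simp [hd] : ¬ ((d == t) = true)), if_neg hnle]
      set f1 := (if 3 ≤ d && pvAdjGet adj c s then PySem.Set.add f (d : Int) else f) with hf1e
      have hf1 : ((t : Int) ∈ f1 ↔ (t : Int) ∈ f) := by
        rw [hf1e]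
        split
        · rw [PySem.Set.mem_add]
          constructor
          · rintro (h | h)
            · exact h
            · exact absurd (Int.natCast_inj.mp h) (by omega)
          · exact Or.inl
        · exact Iff.rfl
      have hsteps : ∀ (f' : List Int) (v : Nat), v ∈ List.range n →
          ((t : Int) ∈ (if pvAdjGet adj c v && !vis.testBit v then
              pvCollect adj n cap s v (vis ||| 1 <<< v) (d+1) f' else f') ↔
            (t : Int) ∈ f' ∨ ((pvAdjGet adj c v && !(vl.getD v false)) = true ∧
              pvDfsA adj n s v (vl.set v true) (d+1) t = true)) := by
        intro f' v hv
        have hvn : v < n := List.mem_range.mp hv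
        have hgeq : (pvAdjGet adj c v && !(vl.getD v false)) = (pvAdjGet adj c v && !vis.testBit v) := by
          rw [hrel v hvn]
        by_cases hg : (pvAdjGet adj c v && !vis.testBit v) = true
        · rw [if_pos hg,
            ih s v (vl.set v true) (vis ||| 1 <<< v) (d+1) f' (by omega) hs hvn (by omega)
              (by simp [hlen]) (pv_rel_set n vl vis v hlen hvn hrel)]
          constructor
          · rintro (h | h)
            · exact Or.inl h
            · exact Or.inr ⟨hgeq ▸ hg, h⟩
          · rintro (h | ⟨_, h⟩)
            · exact Or.inl h
            · exact Or.inr h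
        · rw [if_neg hg]
          constructor
          · exact Or.inl
          · rintro (h | ⟨hg', _⟩)
            · exact h
            · exact absurd (hgeq ▸ hg') hg
      have hany : ((List.range n).any (fun v =>
          if pvAdjGet adj c v && !(vl.getD v false) then
            pvDfsA adj n s v (vl.set v true) (d+1) t else false) = true) ↔
          (∃ v ∈ List.range n, (pvAdjGet adj c v && !(vl.getD v false)) = true ∧
            pvDfsA adj n s v (vl.set v true) (d+1) t = true) := by
        simp only [List.any_eq_true]
        constructor
        · rintro ⟨v, hv, h⟩
          revert h; split
          · next hg => exact fun h => ⟨v, hv, hg, h⟩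
          · simp
        · rintro ⟨v, hv, hg, h⟩
          exact ⟨v, hv, by rw [if_pos hg]; exact h⟩
      by_cases hg : (decide ((d : Int) < cap) && (PySem.List.pyRange 3 (cap + 1) 2).any
          (fun L => decide ((d : Int) < L) && !(PySem.Set.contains f1 L))) = true
      · rw [if_pos hg, pv_foldl_mem_iff ((t : Int))
          (fun v => (pvAdjGet adj c v && !(vl.getD v false)) = true ∧
                    pvDfsA adj n s v (vl.set v true) (d+1) t = true)
          _ _ hsteps _, hf1, hany]
      · rw [if_neg hg]
        have htr : (t : Int) ∈ PySem.List.pyRange 3 (cap + 1) 2 := by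
          rw [PySem.List.mem_pyRange_iff_of_pos (by norm_num : (0 : Int) < 2)]
          refine ⟨by omega, by omega, by omega⟩
        have htf1 : (t : Int) ∈ f1 := by
          by_contra hnot
          apply hg
          rw [Bool.and_eq_true]
          refine ⟨by simpa using hcapd, ?_⟩
          rw [List.any_eq_true]
          refine ⟨(t : Int), htr, ?_⟩
          rw [Bool.and_eq_true]
          refine ⟨by simpa using (by omega : (d : Int) < (t : Int)), ?_⟩
          simp only [Bool.not_eq_true']
          rw [Bool.eq_false_iff]
          intro hcon
          exact hnot ((PySem.Set.contains_iff f1 ((t : Int))).mp hcon)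
        have htf : (t : Int) ∈ f := hf1.mp htf1
        exact ⟨fun _ => Or.inl htf, fun _ => hf1.mpr htf⟩

theorem pv_dfs_congr (a1 a2 : List (List Bool)) (n : Nat)
    (hadj : ∀ p q, p < n → q < n → pvAdjGet a1 p q = pvAdjGet a2 p q) :
    ∀ (fuel s c : Nat) (vl : List Bool) (d t : Nat), t - d ≤ fuel → s < n → c < n →
      pvDfsA a1 n s c vl d t = pvDfsA a2 n s c vl d t := by
  intro fuel
  induction fuel with
  | zero =>
    intro s c vl d t hfu hs hc
    rw [pvDfsA, pvDfsA]
    by_cases hd : d = t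
    · simp [hd, hadj c s hc hs]
    · have : t ≤ d := by omega
      simp [this, hd]
  | succ fuel ih =>
    intro s c vl d t hfu hs hc
    rw [pvDfsA, pvDfsA]
    by_cases hd : d = t
    · simp [hd, hadj c s hc hs]
    · by_cases ht : t ≤ d
      · simp [ht, hd]
      · rw [if_neg (by simp [hd] : ¬ ((d == t) = true)),
            if_neg (by simp [hd] : ¬ ((d == t) = true)), if_neg ht, if_neg ht]
        refine PySem.List.any_congr_mem ?_
        intro v hv
        have hvn : v < n := List.mem_range.mp hv
        rw [hadj c v hc hvn]
        by_cases hg : (pvAdjGet a2 c v && !(vl.getD v false)) = true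
        · rw [if_pos hg, if_pos hg]
          exact ih s v (vl.set v true) (d+1) t (by omega) hs hvn
        · rw [if_neg hg, if_neg hg]

-- ---- characterisation of the two adjacency matrices ----

def pvSH (n : Nat) (m : List (List Bool)) : Prop :=
  m.length = n ∧ ∀ k, k < n → (m.getD k []).length = n

theorem pv_getD_modify (m : List (List Bool)) (i k : Nat) (f : List Bool → List Bool)
    (hf : f [] = []) :
    (m.modify i f).getD k [] = if i = k then f (m.getD k []) else m.getD k [] := by
  rw [List.getD_eq_getElem?_getD, List.getElem?_modify]
  cases hmk : m[k]? with
  | none =>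
    rw [List.getD_eq_getElem?_getD, hmk]
    by_cases hik : i = k <;> simp [hik, hf]
  | some r =>
    rw [List.getD_eq_getElem?_getD, hmk]
    by_cases hik : i = k <;> simp [hik]

theorem pv_getD_set_bool (r : List Bool) (j q : Nat) (hj : j < r.length) :
    (r.set j true).getD q false = if j = q then true else r.getD q false := by
  rw [List.getD_eq_getElem?_getD, List.getElem?_set]
  by_cases hjq : j = q
  · subst hjq; simp [hj]
  · simp only [if_neg hjq]
    rw [← List.getD_eq_getElem?_getD]

theorem pv_SH_init (n : Nat) : pvSH n (List.replicate n (List.replicate n false)) := by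
  constructor
  · simp
  · intro k hk
    simp [List.getD_eq_getElem?_getD, List.getElem?_replicate, hk]

theorem pv_adjGet_init (n p q : Nat) :
    pvAdjGet (List.replicate n (List.replicate n false)) p q = false := by
  unfold pvAdjGet
  simp only [List.getD_eq_getElem?_getD, List.getElem?_replicate]
  split_ifs <;> simp [List.getD_eq_getElem?_getD, List.getElem?_replicate] <;> split_ifs <;> simp

theorem pv_SH_setT {n : Nat} {m : List (List Bool)} (h : pvSH n m) (i j : Nat) :
    pvSH n (pvSetT m i j) := by
  obtain ⟨hlen, hrow⟩ := h
  refine ⟨by simp [pvSetT, hlen], ?_⟩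
  intro k hk
  unfold pvSetT
  rw [pv_getD_modify _ _ _ _ (by simp)]
  split
  · rw [List.length_set]; exact hrow k hk
  · exact hrow k hk

theorem pv_adjGet_setT {n : Nat} {m : List (List Bool)} (h : pvSH n m) {i j : Nat}
    (hi : i < n) (hj : j < n) (p q : Nat) :
    pvAdjGet (pvSetT m i j) p q = if p = i ∧ q = j then true else pvAdjGet m p q := by
  obtain ⟨hlen, hrow⟩ := h
  unfold pvSetT pvAdjGet
  rw [pv_getD_modify _ _ _ _ (by simp)]
  by_cases hip : i = p
  · subst hip
    rw [if_pos rfl, pv_getD_set_bool _ _ _ (by rw [hrow i hi]; exact hj)]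
    by_cases hjq : j = q
    · subst hjq; simp
    · rw [if_neg hjq, if_neg (fun hh : i = i ∧ q = j => hjq hh.2.symm)]
  · rw [if_neg hip]
    have : ¬ (p = i ∧ q = j) := fun ⟨hp, _⟩ => hip hp.symm
    simp [this]

theorem pv_adjA_inner (xs : List Int) (n i : Nat) (hi : i < n) :
    ∀ (js : List Nat) (m : List (List Bool)), pvSH n m → (∀ j ∈ js, j < n) →
      pvSH n (js.foldl (fun m j =>
          if Int.gcd (xs.getD i 0) (xs.getD j 0) == 1 then pvSetT (pvSetT m i j) j i else m) m) ∧
      (∀ p q, (pvAdjGet (js.foldl (fun m j =>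
          if Int.gcd (xs.getD i 0) (xs.getD j 0) == 1 then pvSetT (pvSetT m i j) j i else m) m) p q = true ↔
        pvAdjGet m p q = true ∨ ∃ j ∈ js, Int.gcd (xs.getD i 0) (xs.getD j 0) = 1 ∧
          ((p = i ∧ q = j) ∨ (p = j ∧ q = i)))) := by
  intro js
  induction js with
  | nil => intro m hSH _; exact ⟨hSH, by simp⟩
  | cons j js ih =>
    intro m hSH hjs
    have hjn : j < n := hjs j List.mem_cons_self
    simp only [List.foldl_cons]
    set m' := if Int.gcd (xs.getD i 0) (xs.getD j 0) == 1 then pvSetT (pvSetT m i j) j i else m with hm'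
    have hSH' : pvSH n m' := by
      rw [hm']; split
      · exact pv_SH_setT (pv_SH_setT hSH i j) j i
      · exact hSH
    have hentry : ∀ p q, (pvAdjGet m' p q = true ↔
        pvAdjGet m p q = true ∨ (Int.gcd (xs.getD i 0) (xs.getD j 0) = 1 ∧
          ((p = i ∧ q = j) ∨ (p = j ∧ q = i)))) := by
      intro p q
      rw [hm']; split
      · next hgcd =>
        rw [pv_adjGet_setT (pv_SH_setT hSH i j) hjn hi,
            pv_adjGet_setT hSH hi hjn]
        have hg : Int.gcd (xs.getD i 0) (xs.getD j 0) = 1 := by simpa using hgcd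
        split_ifs with h1 h2 <;> simp_all
      · next hgcd =>
        have hg : ¬ (Int.gcd (xs.getD i 0) (xs.getD j 0) = 1) := by simpa using hgcd
        constructor
        · exact Or.inl
        · rintro (h | ⟨hg1, _⟩)
          · exact h
          · exact absurd hg1 hg
    obtain ⟨ihSH, ihE⟩ := ih m' hSH' (fun j hj => hjs j (List.mem_cons_of_mem _ hj))
    refine ⟨ihSH, ?_⟩
    intro p q
    rw [ihE p q, hentry p q, List.exists_mem_cons_iff, or_assoc]

theorem pv_adjA_outer (xs : List Int) (n : Nat) :
    ∀ (is : List Nat) (m : List (List Bool)), pvSH n m → (∀ i ∈ is, i < n) →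
      pvSH n (is.foldl (fun m i => (List.range' (i+1) (n - (i+1))).foldl (fun m j =>
          if Int.gcd (xs.getD i 0) (xs.getD j 0) == 1 then pvSetT (pvSetT m i j) j i else m) m) m) ∧
      (∀ p q, (pvAdjGet (is.foldl (fun m i => (List.range' (i+1) (n - (i+1))).foldl (fun m j =>
          if Int.gcd (xs.getD i 0) (xs.getD j 0) == 1 then pvSetT (pvSetT m i j) j i else m) m) m) p q = true ↔
        pvAdjGet m p q = true ∨ ∃ i ∈ is, ∃ j ∈ List.range' (i+1) (n - (i+1)),
          Int.gcd (xs.getD i 0) (xs.getD j 0) = 1 ∧ ((p = i ∧ q = j) ∨ (p = j ∧ q = i)))) := by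
  intro is
  induction is with
  | nil => intro m hSH _; exact ⟨hSH, by simp⟩
  | cons i is ih =>
    intro m hSH his
    have hin : i < n := his i List.mem_cons_self
    simp only [List.foldl_cons]
    have hjs : ∀ j ∈ List.range' (i+1) (n - (i+1)), j < n := by
      intro j hj
      have := List.mem_range'_1.mp hj
      omega
    obtain ⟨hSH', hE'⟩ := pv_adjA_inner xs n i hin (List.range' (i+1) (n - (i+1))) m hSH hjs
    obtain ⟨ihSH, ihE⟩ := ih _ hSH' (fun i hi => his i (List.mem_cons_of_mem _ hi))
    refine ⟨ihSH, ?_⟩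
    intro p q
    rw [ihE p q, hE' p q, List.exists_mem_cons_iff, or_assoc]

theorem pv_adjA_char (xs : List Int) (n p q : Nat) (hp : p < n) (hq : q < n) :
    (pvAdjGet (pvBuildAdjA xs n) p q = true ↔
      p ≠ q ∧ Int.gcd (xs.getD p 0) (xs.getD q 0) = 1) := by
  unfold pvBuildAdjA
  obtain ⟨_, hE⟩ := pv_adjA_outer xs n (List.range n) _ (pv_SH_init n)
    (fun i hi => List.mem_range.mp hi)
  rw [hE p q, pv_adjGet_init]
  simp only [Bool.false_eq_true, false_or]
  constructor
  · rintro ⟨i, hi, j, hj, hg, hpq⟩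
    have hi' : i < n := List.mem_range.mp hi
    have hj' : i + 1 ≤ j ∧ j < i + 1 + (n - (i+1)) := List.mem_range'_1.mp hj
    rcases hpq with ⟨rfl, rfl⟩ | ⟨rfl, rfl⟩
    · exact ⟨by omega, hg⟩
    · exact ⟨by omega, by rwa [Int.gcd_comm]⟩
  · rintro ⟨hne, hg⟩
    rcases Nat.lt_or_ge p q with hlt | hge
    · refine ⟨p, List.mem_range.mpr hp, q, List.mem_range'_1.mpr (by omega), hg,
        Or.inl ⟨rfl, rfl⟩⟩
    · have hqp : q < p := by omega
      refine ⟨q, List.mem_range.mpr hq, p, List.mem_range'_1.mpr (by omega),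
        by rwa [Int.gcd_comm], Or.inr ⟨rfl, rfl⟩⟩

theorem pv_adjB_char (xs : List Int) (n p q : Nat) (hp : p < n) (hq : q < n) :
    pvAdjGet (pvAdjB xs n) p q =
      (decide (p ≠ q) && (Int.gcd (xs.getD p 0) (xs.getD q 0) == 1)) := by
  unfold pvAdjB pvAdjGet
  simp [List.getD_eq_getElem?_getD, hp, hq]

theorem pv_adj_eq (xs : List Int) (n : Nat) :
    ∀ p q, p < n → q < n → pvAdjGet (pvBuildAdjA xs n) p q = pvAdjGet (pvAdjB xs n) p q := by
  intro p q hp hq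
  rw [Bool.eq_iff_iff, pv_adjA_char xs n p q hp hq, pv_adjB_char xs n p q hp hq]
  simp

-- ---- glue: parity, ranges, set-building folds ----

theorem pv_pymod2 (x : Int) : PySem.Int.mod x 2 = x % 2 := by
  simp [PySem.Int.mod, Int.fmod_eq_emod_of_nonneg]

theorem pv_hasCycle_congr (xs : List Int) (n t : Nat) :
    pvHasCycle (pvBuildAdjA xs n) n t = pvHasCycle (pvAdjB xs n) n t := by
  unfold pvHasCycle
  split
  · rfl
  · refine PySem.List.any_congr_mem ?_
    intro s hs
    have hsn : s < n := List.mem_range.mp hs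
    exact pv_dfs_congr _ _ n (pv_adj_eq xs n) t s s _ 1 t (by omega) hsn hsn

theorem pv_found_iff (adj : List (List Bool)) (n : Nat) (cap : Int) (t : Nat)
    (h3 : 3 ≤ t) (hodd : t % 2 = 1) (htn : t ≤ n) (hcap : (t : Int) ≤ cap) :
    (PySem.Set.contains ((List.range n).foldl
        (fun f s =>
          if (PySem.List.pyRange 3 (cap + 1) 2).any (fun L => !(PySem.Set.contains f L)) then
            pvCollect adj n cap s s (1 <<< s) 1 f
          else f) []) ((t : Int)))
      = pvHasCycle adj n t := by
  have htr : (t : Int) ∈ PySem.List.pyRange 3 (cap + 1) 2 := by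
    rw [PySem.List.mem_pyRange_iff_of_pos (by norm_num : (0 : Int) < 2)]
    refine ⟨by omega, by omega, by omega⟩
  have hsteps : ∀ (f : List Int) (s : Nat), s ∈ List.range n →
      ((t : Int) ∈ (if (PySem.List.pyRange 3 (cap + 1) 2).any (fun L => !(PySem.Set.contains f L)) then
            pvCollect adj n cap s s (1 <<< s) 1 f
          else f) ↔
        (t : Int) ∈ f ∨ pvDfsA adj n s s ((List.replicate n false).set s true) 1 t = true) := by
    intro f s hs
    have hsn : s < n := List.mem_range.mp hs
    split
    · exact pv_collect_dfs adj n cap t h3 hodd hcap t s s _ (1 <<< s) 1 f (by omega) hsn hsn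
        (by omega) (by simp) (pv_rel_init n s hsn)
    · next hg =>
      have htf : (t : Int) ∈ f := by
        by_contra hnot
        apply hg
        rw [List.any_eq_true]
        refine ⟨(t : Int), htr, ?_⟩
        simp only [Bool.not_eq_true']
        rw [Bool.eq_false_iff]
        intro hcon
        exact hnot ((PySem.Set.contains_iff f ((t : Int))).mp hcon)
      exact ⟨fun _ => Or.inl htf, fun _ => htf⟩
  rw [Bool.eq_iff_iff, PySem.Set.contains_iff,
      pv_foldl_mem_iff ((t : Int)) _ _ _ hsteps []]
  unfold pvHasCycle
  rw [if_neg (by omega : ¬ (n < t))]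
  simp [List.any_eq_true]

theorem pv_foldl_add_filter (p : Int → Bool) :
    ∀ (l : List Int) (acc : List Int), l.Nodup → (∀ x ∈ l, x ∉ acc) →
      l.foldl (fun acc x => if p x then PySem.Set.add acc x else acc) acc = acc ++ l.filter p := by
  intro l
  induction l with
  | nil => intro acc _ _; simp
  | cons a l ih =>
    intro acc hnd hdis
    simp only [List.foldl_cons]
    by_cases hp : p a = true
    · rw [if_pos hp, PySem.Set.add_of_not_mem (hdis a List.mem_cons_self),
        ih (acc ++ [a]) (List.nodup_cons.mp hnd).2 ?_]
      · simp [List.filter_cons, hp]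
      · intro x hx
        simp only [List.mem_append, List.mem_singleton]
        rintro (h | rfl)
        · exact hdis x (List.mem_cons_of_mem _ hx) h
        · exact (List.nodup_cons.mp hnd).1 hx
    · rw [if_neg hp, ih acc (List.nodup_cons.mp hnd).2
        (fun x hx => hdis x (List.mem_cons_of_mem _ hx))]
      simp [List.filter_cons, hp]

theorem pv_range2_filter (limit cap : Int)
    (hc : cap = if PySem.Int.mod limit 2 == 1 then limit else limit - 1) :
    PySem.List.pyRange 3 (cap + 1) 2 =
      (PySem.List.pyRange 3 (limit + 1) 1).filter (fun x => PySem.Int.mod x 2 == 1) := by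
  have h2 : (0 : Int) < 2 := by norm_num
  have hcap : (cap = limit ∧ limit % 2 = 1) ∨ (cap = limit - 1 ∧ limit % 2 = 0) := by
    rw [hc]
    rcases Int.emod_two_eq limit with h | h <;>
      simp [pv_pymod2, h]
  have hpw2 : (PySem.List.pyRange 3 (cap + 1) 2).Pairwise (· < ·) := by
    rw [PySem.List.pyRange_of_pos _ _ h2]
    refine List.Pairwise.map _ ?_ (List.pairwise_lt_range)
    intro a b hab
    omega
  have hpw1 : ((PySem.List.pyRange 3 (limit + 1) 1).filter
      (fun x => PySem.Int.mod x 2 == 1)).Pairwise (· < ·) :=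
    (PySem.List.pairwise_lt_pyRange_one 3 (limit + 1)).filter _
  refine List.eq_of_perm_of_sorted (fun a b _ _ h1 h2 => by omega) hpw2 hpw1 ?_
  refine (List.perm_ext_iff_of_nodup (hpw2.imp ne_of_lt) (hpw1.imp ne_of_lt)).mpr ?_
  intro x
  rw [PySem.List.mem_pyRange_iff_of_pos h2, List.mem_filter, PySem.List.mem_pyRange_one]
  simp only [pv_pymod2, beq_iff_eq, decide_eq_true_eq]
  rcases hcap with ⟨rfl, h⟩ | ⟨hce, h⟩ <;> [skip; subst hce] <;>
    constructor <;> intro hh <;> [skip;skip;skip;skip] <;> omega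

theorem pv_core (xs : List Int) (maxL limit : Int) (h3 : ¬ xs.length < 3)
    (hlim : limit = min maxL (xs.length : Int)) :
    (PySem.List.pyRange 3 (min (maxL + 1) ((xs.length : Int) + 1)) 1).foldl
      (fun acc len => if PySem.Int.mod len 2 == 0 then acc
        else if pvHasCycle (pvBuildAdjA xs xs.length) xs.length len.toNat then
          PySem.Set.add acc len else acc) []
    = (PySem.List.pyRange 3 ((if PySem.Int.mod limit 2 == 1 then limit else limit - 1) + 1) 2).foldl
        (fun acc L => if PySem.Set.contains ((List.range xs.length).foldl
            (fun f s =>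
              if (PySem.List.pyRange 3 ((if PySem.Int.mod limit 2 == 1 then limit else limit - 1) + 1) 2).any
                  (fun L => !(PySem.Set.contains f L)) then
                pvCollect (pvAdjB xs xs.length) xs.length
                  (if PySem.Int.mod limit 2 == 1 then limit else limit - 1) s s (1 <<< s) 1 f
              else f) []) L
          then PySem.Set.add acc L else acc) [] := by
  set n := xs.length with hn
  set cap : Int := if PySem.Int.mod limit 2 == 1 then limit else limit - 1 with hcap
  set found : List Int := (List.range n).foldl
      (fun f s =>
        if (PySem.List.pyRange 3 (cap + 1) 2).any (fun L => !(PySem.Set.contains f L)) then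
          pvCollect (pvAdjB xs n) n cap s s (1 <<< s) 1 f
        else f) [] with hfound
  have hmin : min (maxL + 1) ((n : Int) + 1) = limit + 1 := by rw [hlim]; omega
  rw [hmin]
  have hlimn : limit ≤ (n : Int) := by rw [hlim]; omega
  have hcapsplit : (cap = limit ∧ limit % 2 = 1) ∨ (cap = limit - 1 ∧ limit % 2 = 0) := by
    rw [hcap]
    rcases Int.emod_two_eq limit with h | h <;> simp [pv_pymod2, h]
  -- A side: the skip-even fold is a filtered fold
  have hcong : ∀ (acc : List Int), ∀ len ∈ PySem.List.pyRange 3 (limit + 1) 1,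
      (if PySem.Int.mod len 2 == 0 then acc
        else if pvHasCycle (pvBuildAdjA xs n) n len.toNat then PySem.Set.add acc len else acc)
      = (if (decide (PySem.Int.mod len 2 = 1) &&
          pvHasCycle (pvBuildAdjA xs n) n len.toNat) then PySem.Set.add acc len else acc) := by
    intro acc len _
    rcases Int.emod_two_eq len with h | h <;> simp [pv_pymod2, h]
  rw [PySem.List.foldl_congr_mem (PySem.List.pyRange 3 (limit + 1) 1) _ _ [] hcong,
      pv_foldl_add_filter _ _ [] (PySem.List.nodup_pyRange_one 3 (limit + 1)) (by simp)]
  -- B side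
  rw [pv_range2_filter limit cap hcap,
      pv_foldl_add_filter (fun L => PySem.Set.contains found L) _ []
        ((PySem.List.nodup_pyRange_one 3 (limit + 1)).filter _) (by simp),
      List.filter_filter]
  simp only [List.nil_append]
  refine List.filter_congr ?_
  intro x hx
  have hxm : 3 ≤ x ∧ x < limit + 1 := PySem.List.mem_pyRange_one.mp hx
  rcases Int.emod_two_eq x with h | h
  · simp [pv_pymod2, h]
  · have ht : ((x.toNat : Int)) = x := Int.toNat_of_nonneg (by omega)
    have h3t : 3 ≤ x.toNat := by omega
    have htn : x.toNat ≤ n := by omega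
    have hcapt : ((x.toNat : Int)) ≤ cap := by
      rcases hcapsplit with ⟨hce, hp⟩ | ⟨hce, hp⟩ <;> rw [hce] <;> omega
    have hoddt : x.toNat % 2 = 1 := by omega
    rw [pv_hasCycle_congr xs n x.toNat,
        ← pv_found_iff (pvAdjB xs n) n cap x.toNat h3t hoddt htn hcapt]
    rw [← hfound, ht]
    simp [pv_pymod2, h]

theorem main_equiv : ∀ (A : List Int) (max_length : Option Int),
    find_odd_cycle_lengths A max_length = find_odd_cycle_lengths_alt A max_length := by
  intro A ml
  unfold find_odd_cycle_lengths find_odd_cycle_lengths_alt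
  by_cases h3 : (PySem.List.sorted A (fun x => x) false).length < 3
  · simp only [if_pos h3]
  · simp only [if_neg h3]
    cases ml with
    | none =>
      exact pv_core (PySem.List.sorted A (fun x => x) false) _ _ h3 (min_self _).symm
    | some m =>
      exact pv_core (PySem.List.sorted A (fun x => x) false) _ _ h3 rfl

-- ===== VERDICT (by name: the statement is the Claim_ definition above) =====
theorem find_odd_cycle_lengths_spec : Claim_equal_find_odd_cycle_lengths := by
  intro A ml _
  unfold Spec_find_odd_cycle_lengths
  exact main_equiv A ml
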